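-- pv_equiv track=rewrite | github.com/micheleAlberto/trackClosure | trackClosure/src/trackAnalysis/trackAnalisys.py | observations
-- ===== SOURCE A (Python) =====
-- from collections import Counter, namedtuple
-- from itertools import combinations
--
-- Shadow=namedtuple('shadow', ['i', 'j', 'k'])
--
-- def observations(P_list,gEpG):
--     #triplets: images i and j project to image k
--     IJK={
--         k:[
--             Shadow(i, j, k)
--             for i, j in combinations(P_list, 2)
--             if ((i, k) in gEpG
--             and (j, k) in gEpG)
--           ]
--     for k in P_list}
--     return IJK
-- ===== SOURCE B (Python) =====
-- # Pair-major algorithm: invert gEpG into image->targets once, enumerate each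
-- # pair (i, j) a single time computing its common targets, then distribute the
-- # flat triple stream into per-k buckets in one grouping pass (no per-k pair loop).
-- def observations(P_list, gEpG):
--     targets = {}
--     for i, k in gEpG:
--         targets.setdefault(i, {})[k] = True
--     flat = []
--     rest = list(P_list)
--     while rest:
--         i = rest.pop(0)
--         ti = targets.get(i, {})
--         for j in rest:
--             tj = targets.get(j, {})
--             for k in ti:
--                 if k in tj:
--                     flat.append((i, j, k))
--     groups = {}
--     for t in flat:
--         groups[t[2]] = groups.get(t[2], []) + [t]
--     return {k: groups.get(k, []) for k in P_list}
-- ===== Notes on version B (the rewrite author's own statement) =====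
-- stated objective: faster
-- what changed: A loops over every k and tests every pair of P_list against gEpG; B is pair-major: it inverts gEpG into an image->targets index once, visits each pair (i,j) exactly once to intersect their target sets, emits a flat triple stream, and distributes it into per-k buckets in a single grouping pass.
import Mathlib
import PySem

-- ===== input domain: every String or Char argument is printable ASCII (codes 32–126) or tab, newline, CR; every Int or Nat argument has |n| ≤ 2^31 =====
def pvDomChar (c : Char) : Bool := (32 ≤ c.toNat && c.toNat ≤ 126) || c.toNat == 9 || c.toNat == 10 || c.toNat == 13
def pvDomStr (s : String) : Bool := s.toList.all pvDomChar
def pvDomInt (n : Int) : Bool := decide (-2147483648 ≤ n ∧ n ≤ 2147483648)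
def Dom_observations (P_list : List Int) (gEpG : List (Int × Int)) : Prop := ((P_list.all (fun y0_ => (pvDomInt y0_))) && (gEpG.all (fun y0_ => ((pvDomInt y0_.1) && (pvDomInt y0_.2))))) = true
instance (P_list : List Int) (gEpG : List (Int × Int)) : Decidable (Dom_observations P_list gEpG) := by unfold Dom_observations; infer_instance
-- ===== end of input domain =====

-- B is pair-major: it inverts gEpG into an image->targets index once, visits each
-- pair (i, j) once to intersect their target sets, and distributes the flat triple
-- stream into per-k buckets in one grouping pass, instead of A's per-k scan of all pairs.

-- ===== PORT A =====
-- itertools.combinations(P_list, 2)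
def combos2 : List Int → List (Int × Int)
  | [] => []
  | x :: xs => xs.map (fun y => (x, y)) ++ combos2 xs

def observations (P_list : List Int) (gEpG : List (Int × Int)) : List (Int × List (Int × Int × Int)) :=
  (P_list.foldl (fun d k =>
      d.insert k
        (((combos2 P_list).filter
            (fun p => gEpG.contains (p.1, k) && gEpG.contains (p.2, k))).map
          (fun p => (p.1, p.2, k))))
    PySem.Dict.empty).items

-- ===== PORT B =====
-- 'targets = {}; for i, k in gEpG: targets.setdefault(i, {})[k] = True'
def buildTargets (gEpG : List (Int × Int)) : PySem.Dict Int (PySem.Dict Int Bool) :=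
  gEpG.foldl (fun d p => d.insert p.1 ((d.getD p.1 PySem.Dict.empty).insert p.2 true)) PySem.Dict.empty

-- 'while rest: i = rest.pop(0); for j in rest: for k in ti: if k in tj: flat.append((i, j, k))'
def flatLoop (targets : PySem.Dict Int (PySem.Dict Int Bool)) :
    List Int → List (Int × Int × Int) → List (Int × Int × Int)
  | [], flat => flat
  | i :: rest, flat =>
      let ti := targets.getD i PySem.Dict.empty
      flatLoop targets rest
        (flat ++ rest.flatMap (fun j =>
          let tj := targets.getD j PySem.Dict.empty
          (ti.keys.filter (fun k => tj.contains k)).map (fun k => (i, j, k))))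

def observations_alt (P_list : List Int) (gEpG : List (Int × Int)) : List (Int × List (Int × Int × Int)) :=
  let targets := buildTargets gEpG
  let flat := flatLoop targets P_list []
  -- 'groups[t[2]] = groups.get(t[2], []) + [t]'
  let groups := flat.foldl (fun g t => g.insert t.2.2 (g.getD t.2.2 [] ++ [t])) PySem.Dict.empty
  (P_list.foldl (fun d k => d.insert k (groups.getD k [])) PySem.Dict.empty).items

-- ===== PRECONDITION & SPEC =====
def Spec_observations (P_list : List Int) (gEpG : List (Int × Int)) (out : List (Int × List (Int × Int × Int))) : Prop := out = observations_alt P_list gEpG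
instance (P_list : List Int) (gEpG : List (Int × Int)) (out : List (Int × List (Int × Int × Int))) : Decidable (Spec_observations P_list gEpG out) := by unfold Spec_observations; infer_instance

-- ===== CLAIM (what is proved, stated in full; the proofs are below) =====
def Claim_equal_observations : Prop := ∀ (P_list : List Int) (gEpG : List (Int × Int)), Dom_observations P_list gEpG → Spec_observations P_list gEpG (observations P_list gEpG)

-- ===== LEMMAS AND PROOFS =====

-- inserting the same computed value per key: the folds agree
theorem fold_insert_congr (f g : Int → List (Int × Int × Int))
    (hfg : ∀ k, f k = g k) (l : List Int) (d : PySem.Dict Int (List (Int × Int × Int))) :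
    l.foldl (fun d k => d.insert k (f k)) d = l.foldl (fun d k => d.insert k (g k)) d := by
  induction l generalizing d with
  | nil => rfl
  | cons k rest ih => simp [List.foldl, hfg k, ih]

-- the grouping fold, read back at one key, is a filter of the flat stream
theorem groups_getD (flat : List (Int × Int × Int)) (g : PySem.Dict Int (List (Int × Int × Int))) (k : Int) :
    (flat.foldl (fun g t => g.insert t.2.2 (g.getD t.2.2 [] ++ [t])) g).getD k []
      = g.getD k [] ++ flat.filter (fun t => t.2.2 == k) := by
  induction flat generalizing g with
  | nil => simp
  | cons t rest ih =>
      simp only [List.foldl_cons, ih, List.filter_cons]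
      by_cases h : t.2.2 = k
      · simp [h]
      · simp [PySem.Dict.getD_insert, h, Ne.symm h]


-- the while/pop loop is a flatMap over combinations
theorem flatLoop_eq (targets : PySem.Dict Int (PySem.Dict Int Bool)) (l : List Int) (flat : List (Int × Int × Int)) :
    flatLoop targets l flat
      = flat ++ (combos2 l).flatMap (fun p =>
          (((targets.getD p.1 PySem.Dict.empty).keys.filter
              (fun k => (targets.getD p.2 PySem.Dict.empty).contains k)).map
            (fun k => (p.1, p.2, k)))) := by
  induction l generalizing flat with
  | nil => simp [flatLoop, combos2]
  | cons i rest ih =>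
      simp only [flatLoop, combos2, ih, List.flatMap_append, List.flatMap_map, List.append_assoc]

-- target-index membership = edge membership
theorem targets_contains (gEpG : List (Int × Int)) (d : PySem.Dict Int (PySem.Dict Int Bool)) (i k : Int) :
    ((gEpG.foldl (fun d p => d.insert p.1 ((d.getD p.1 PySem.Dict.empty).insert p.2 true)) d).getD i PySem.Dict.empty).contains k
      = ((d.getD i PySem.Dict.empty).contains k || gEpG.contains (i, k)) := by
  induction gEpG generalizing d with
  | nil => simp
  | cons p rest ih =>
      simp only [List.foldl_cons, ih, List.contains_cons]
      by_cases hi : i = p.1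
      · subst hi
        by_cases hk : k = p.2
        · subst hk
          simp
        · have h1 : (k == p.2) = false := by simp [hk]
          have h2 : ((p.1, k) == p) = false := by
            simp [beq_eq_false_iff_ne, Prod.ext_iff, hk]
          simp [PySem.Dict.contains_insert, h1, h2]
      · have h2 : ((i, k) == p) = false := by
          simp [beq_eq_false_iff_ne, Prod.ext_iff, hi]
        simp [PySem.Dict.getD_insert, hi, h2]

-- every per-image target dict in the index has nodup keys
theorem targets_keys_nodup (gEpG : List (Int × Int)) (d : PySem.Dict Int (PySem.Dict Int Bool))
    (hd : ∀ i, ((d.getD i PySem.Dict.empty).keys).Nodup) (i : Int) :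
    (((gEpG.foldl (fun d p => d.insert p.1 ((d.getD p.1 PySem.Dict.empty).insert p.2 true)) d).getD i PySem.Dict.empty).keys).Nodup := by
  induction gEpG generalizing d with
  | nil => exact hd i
  | cons p rest ih =>
      refine ih _ (fun j => ?_)
      by_cases hj : j = p.1
      · subst hj
        simpa [PySem.Dict.getD_insert] using PySem.Dict.nodup_keys_insert _ _ _ (hd p.1)
      · simpa [PySem.Dict.getD_insert, hj] using hd j

-- a nodup list filtered to one element
theorem filter_eq_singleton (l : List Int) (hl : l.Nodup) (k : Int) :
    l.filter (fun x => x == k) = if k ∈ l then [k] else [] := by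
  induction l with
  | nil => simp
  | cons x xs ih =>
      rcases List.nodup_cons.mp hl with ⟨hx, hxs⟩
      by_cases h : x = k
      · subst h
        simp [ih hxs, hx]
      · simp [h, ih hxs, Ne.symm h]

-- flatMap of per-pair singletons = filter then map
theorem flatMap_ite_singleton (l : List (Int × Int)) (c : Int × Int → Bool) (k : Int) :
    l.flatMap (fun p => if c p then [(p.1, p.2, k)] else [])
      = (l.filter c).map (fun p => (p.1, p.2, k)) := by
  induction l with
  | nil => rfl
  | cons p rest ih =>
      by_cases h : c p <;> simp [List.flatMap_cons, h, ih]

-- ===== VERDICT (by name: the statement is the Claim_ definition above) =====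
theorem observations_spec : Claim_equal_observations := by
  intro P_list gEpG _
  unfold Spec_observations observations observations_alt
  refine congrArg PySem.Dict.items ?_
  refine fold_insert_congr _ _ (fun k => ?_) P_list PySem.Dict.empty
  rw [groups_getD, PySem.Dict.getD_empty, List.nil_append, flatLoop_eq, List.nil_append,
      List.filter_flatMap]
  rw [← flatMap_ite_singleton (combos2 P_list)
        (fun p => gEpG.contains (p.1, k) && gEpG.contains (p.2, k)) k]
  refine List.flatMap_congr (fun p _ => ?_)
  rw [List.filter_map]
  have hnodup : ((buildTargets gEpG).getD p.1 PySem.Dict.empty).keys.Nodup :=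
    targets_keys_nodup gEpG PySem.Dict.empty (by simp) p.1
  have hfilter := filter_eq_singleton
    (((buildTargets gEpG).getD p.1 PySem.Dict.empty).keys.filter
      (fun x => (buildTargets gEpG).getD p.2 PySem.Dict.empty |>.contains x))
    (hnodup.filter _) k
  have hcomp : ((fun t : Int × Int × Int => t.2.2 == k) ∘ fun x => (p.1, p.2, x)) = (fun x => x == k) := by
    funext x; rfl
  rw [hcomp, hfilter]
  have hmem : (k ∈ ((buildTargets gEpG).getD p.1 PySem.Dict.empty).keys.filter
        (fun x => (buildTargets gEpG).getD p.2 PySem.Dict.empty |>.contains x))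
      ↔ (gEpG.contains (p.1, k) && gEpG.contains (p.2, k)) = true := by
    rw [List.mem_filter, ← PySem.Dict.contains_iff_mem_keys]
    unfold buildTargets
    rw [targets_contains, targets_contains]
    simp
  by_cases h : (gEpG.contains (p.1, k) && gEpG.contains (p.2, k)) = true
  · have h' : (p.1, k) ∈ gEpG ∧ (p.2, k) ∈ gEpG := by simpa using h
    simp [hmem.mpr h, h']
  · rw [if_neg (fun hm => h (hmem.mp hm)), if_neg (by simpa using h)]
    simp
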